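-- pv_equiv track=rewrite | github.com/whitebox-research/c2-proving-ground-martinez-cot | scripts/putnam2_split_cots.py | parse_model_split_response
-- ===== SOURCE A (Python) =====
-- def parse_model_split_response(split_text: str) -> list[str]:
--     """Parse the model split response into a list of steps."""
--     # Extract sections between <section N> tags
--
--     # Remove all ```markdown and ```
--     split_text = split_text.replace("```markdown", "").replace("```", "")
--     sections = []
--     current_pos = 0
--
--     # Find if there is any text before the first section
--     first_section_start = split_text.find("<section")
--     if first_section_start > 0:
--         sections.append(split_text[:first_section_start].strip())
--
--     while True:
--         # Find the start of the next section
--         start = split_text.find("<section", current_pos)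
--         if start == -1:
--             break
--
--         # Find the end of the section tag
--         tag_end = split_text.find(">", start)
--         if tag_end == -1:
--             break
--
--         # Find the start of the next section (if any)
--         next_start = split_text.find("<section", tag_end)
--
--         # Extract the section content
--         if next_start == -1:
--             # This is the last section
--             section_text = split_text[tag_end + 1 :]
--         else:
--             section_text = split_text[tag_end + 1 : next_start]
--
--         # Remove any closing section tags with or without numbers
--         while True:
--             close_tag_start = section_text.find("</section")
--             if close_tag_start == -1:
--                 break
--             close_tag_end = section_text.find(">", close_tag_start)
--             if close_tag_end == -1:
--                 break
--             section_text = (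
--                 section_text[:close_tag_start] + " " + section_text[close_tag_end + 1 :]
--             )
--
--         # Remove leading `
--         section_text = section_text.lstrip("`")
--
--         # Remove trailing `
--         section_text = section_text.rstrip("`")
--
--         # Remove leading and trailing whitespace
--         section_text = section_text.strip()
--
--         if section_text:
--             # Only add if it's not empty
--             sections.append(section_text)
--
--         current_pos = next_start if next_start != -1 else len(split_text)
--
--     return sections
-- ===== SOURCE B (Python) =====
-- def _collapse_close_tags(text: str) -> str:
--     # One forward pass: emit text up to each "</section...>" tag, replace the tag
--     # by a single space, continue after its ">"; a dangling "</section" without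
--     # ">" keeps the rest verbatim.
--     out = []
--     while True:
--         i = text.find("</section")
--         if i == -1:
--             out.append(text)
--             break
--         j = text.find(">", i)
--         if j == -1:
--             out.append(text)
--             break
--         out.append(text[:i])
--         out.append(" ")
--         text = text[j + 1:]
--     return "".join(out)
--
--
-- def parse_model_split_response(split_text: str) -> list[str]:
--     """Parse the model split response into a list of steps."""
--     text = split_text.replace("```markdown", "").replace("```", "")
--     parts = text.split("<section")
--     if len(parts) == 1:
--         return []
--     sections = []
--     if parts[0]:
--         sections.append(parts[0].strip())
--     for part in parts[1:]:
--         gt = part.find(">")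
--         if gt == -1:
--             continue
--         body = _collapse_close_tags(part[gt + 1:]).strip("`").strip()
--         if body:
--             sections.append(body)
--     return sections
-- ===== Notes on version B (the rewrite author's own statement) =====
-- stated objective: simpler
-- what changed: B replaces A's index-threading while-loop (find/current_pos bookkeeping with cross-chunk '>' searches) by splitting the text on the literal '<section' and emitting one section per chunk that contains '>', and replaces A's close-tag removal loop (re-splice and re-scan from position 0) by a single forward pass; same return value everywhere.
import Mathlib
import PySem

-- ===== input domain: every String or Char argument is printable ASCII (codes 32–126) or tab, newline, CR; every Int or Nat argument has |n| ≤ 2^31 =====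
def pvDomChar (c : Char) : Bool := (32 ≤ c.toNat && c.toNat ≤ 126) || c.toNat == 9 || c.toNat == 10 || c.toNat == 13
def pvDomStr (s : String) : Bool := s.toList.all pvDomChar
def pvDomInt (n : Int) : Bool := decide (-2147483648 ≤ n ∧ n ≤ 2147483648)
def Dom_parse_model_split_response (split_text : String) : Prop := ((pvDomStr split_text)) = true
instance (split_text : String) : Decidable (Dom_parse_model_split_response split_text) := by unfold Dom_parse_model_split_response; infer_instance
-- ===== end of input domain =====

-- B re-traverses the text as a flat pass over the chunks of split("<section") with a single
-- forward pass collapsing close tags, instead of A's index-threading find loop with re-splicing;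
-- objective: simpler (same return value; no mutation involved).

-- literal string constants used by both Python versions
def pvTag : List Char := "<section".toList
def pvClose : List Char := "</section".toList
def pvGt : List Char := ">".toList

-- find/findFrom facts the ports' termination proofs cite by name
theorem pvFind_nonneg_of_ne {s sub : List Char} (h : PySem.Chars.find s sub ≠ -1) :
    0 ≤ PySem.Chars.find s sub := by
  have := PySem.Chars.neg_one_le_find s sub; omega

theorem pvOcc_of_find {s sub : List Char} (h : PySem.Chars.find s sub ≠ -1) :
    sub <+: s.drop (PySem.Chars.find s sub).toNat :=
  (PySem.Chars.find_spec (pvFind_nonneg_of_ne h)).1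

theorem pvPrefix_getElem {sub l : List Char} (h : sub <+: l) (i : ℕ) (hi : i < sub.length) :
    ∃ hl : i < l.length, l[i] = sub[i] :=
  ⟨lt_of_lt_of_le hi h.length_le, (h.getElem hi).symm⟩

theorem pvFindFrom_nat (s sub : List Char) (k : ℕ) :
    PySem.Chars.findFrom s sub (k : ℤ) none =
      if s.length < k then -1
      else if PySem.Chars.find (s.drop k) sub = -1 then -1
      else (k : ℤ) + PySem.Chars.find (s.drop k) sub := by
  by_cases h : k ≤ s.length
  · rw [PySem.Chars.findFrom_natCast s sub k h, if_neg (show ¬s.length < k by omega)]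
  · rw [if_pos (show s.length < k by omega)]
    simp only [PySem.Chars.findFrom]
    rw [if_neg (show ¬((k : ℤ) < 0) by omega)]
    rw [if_pos (show (s.length : ℤ) < (k : ℤ) by exact_mod_cast by omega)]

-- the two pvClose/pvGt head-clash facts used for strict decrease
theorem pvGt_not_at_close {l : List Char} (h1 : pvClose <+: l) (h2 : pvGt <+: l) : False := by
  obtain ⟨hl1, e1⟩ := pvPrefix_getElem h1 0 (by decide)
  obtain ⟨hl2, e2⟩ := pvPrefix_getElem h2 0 (by decide)
  rw [e1] at e2
  simp [pvClose, pvGt] at e2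

theorem pvGt_not_at_tag {l : List Char} (h1 : pvTag <+: l) (h2 : pvGt <+: l) : False := by
  obtain ⟨hl1, e1⟩ := pvPrefix_getElem h1 0 (by decide)
  obtain ⟨hl2, e2⟩ := pvPrefix_getElem h2 0 (by decide)
  rw [e1] at e2
  simp [pvTag, pvGt] at e2

-- shared decrease skeleton: from "find t big ≠ -1" and "findFrom t pvGt (find t big) ≠ -1"
-- extract the arithmetic facts both recursive helpers need
theorem pvCleanStep {t : List Char} {big : List Char}
    (hhead : ∀ l : List Char, big <+: l → pvGt <+: l → False)
    (hcs : PySem.Chars.find t big ≠ -1)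
    (hce : PySem.Chars.findFrom t pvGt (PySem.Chars.find t big) none ≠ -1) :
    ∃ c f : ℕ, PySem.Chars.find t big = (c : ℤ) ∧
      PySem.Chars.findFrom t pvGt (PySem.Chars.find t big) none = ((c + f : ℕ) : ℤ) ∧
      1 ≤ f ∧ c + big.length ≤ t.length ∧ c + f + 1 ≤ t.length := by
  have h0 := pvFind_nonneg_of_ne hcs
  have hocc := pvOcc_of_find hcs
  set c := (PySem.Chars.find t big).toNat with hc
  have hcast : PySem.Chars.find t big = (c : ℤ) := (Int.toNat_of_nonneg h0).symm
  have hcle : c ≤ t.length := by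
    have := PySem.Chars.find_le_length t big; omega
  have hclen : c + big.length ≤ t.length := by
    have := hocc.length_le; simp [List.length_drop] at this; omega
  rw [hcast, pvFindFrom_nat t pvGt c] at hce
  rw [if_neg (show ¬t.length < c by omega)] at hce
  have hf : PySem.Chars.find (t.drop c) pvGt ≠ -1 := by
    intro h; rw [if_pos h] at hce; exact hce rfl
  have hf0 := pvFind_nonneg_of_ne hf
  set f := (PySem.Chars.find (t.drop c) pvGt).toNat with hfn
  have hfcast : PySem.Chars.find (t.drop c) pvGt = (f : ℤ) := (Int.toNat_of_nonneg hf0).symm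
  have hoccf := pvOcc_of_find hf
  rw [← hfn] at hoccf
  have hflen : c + f + 1 ≤ t.length := by
    have := hoccf.length_le; simp [List.length_drop, pvGt] at this; omega
  have hf1 : 1 ≤ f := by
    rcases Nat.eq_zero_or_pos f with h | h
    · exfalso
      rw [h] at hoccf
      simp only [List.drop_zero] at hoccf
      exact hhead _ hocc hoccf
    · exact h
  refine ⟨c, f, hcast, ?_, hf1, hclen, hflen⟩
  rw [hcast, pvFindFrom_nat t pvGt c, if_neg (show ¬t.length < c by omega), if_neg hf, hfcast]
  push_cast; omega

-- ===== PORT A =====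
-- split_text.replace("```markdown", "").replace("```", "")
def pvA_fences (s : List Char) : List Char :=
  PySem.Chars.replace (PySem.Chars.replace s "```markdown".toList []) "```".toList []

-- section_text.lstrip("`") / rstrip("`"): hand ports (dropWhile over the char set; exact)
def pvA_lstripBT (s : List Char) : List Char := s.dropWhile (fun c => ['`'].contains c)
def pvA_rstripBT (s : List Char) : List Char := (s.reverse.dropWhile (fun c => ['`'].contains c)).reverse

-- decrease facts for the recursive helpers (cited by name in decreasing_by)
theorem pvA_clean_dec (t : List Char)
    (hcs : ¬ PySem.Chars.find t pvClose = -1)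
    (hce : ¬ PySem.Chars.findFrom t pvGt (PySem.Chars.find t pvClose) none = -1) :
    (PySem.Chars.slice t none (some (PySem.Chars.find t pvClose)) ++ [' '] ++
      PySem.Chars.slice t (some (PySem.Chars.findFrom t pvGt (PySem.Chars.find t pvClose) none + 1)) none).length
      < t.length := by
  obtain ⟨c, f, e1, e2, hf1, hc9, hcf⟩ :=
    pvCleanStep (big := pvClose) (fun l a b => pvGt_not_at_close a b) hcs hce
  rw [e1] at e2
  simp only [e1, e2, PySem.Chars.slice_eq_listSlice, List.length_append,
    PySem.List.slice_to_natCast]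
  have : ((c + f : ℕ) : ℤ) + 1 = ((c + f + 1 : ℕ) : ℤ) := by push_cast; omega
  rw [this, PySem.List.slice_from_natCast]
  simp only [List.length_take, List.length_drop, List.length_cons, List.length_nil]
  omega

-- the inner "remove closing section tags" while-loop of A (re-splice and re-scan from 0)
def pvA_clean (t : List Char) : List Char :=
  let cs := PySem.Chars.find t pvClose
  if hcs : cs = -1 then t
  else
    let ce := PySem.Chars.findFrom t pvGt cs none
    if hce : ce = -1 then t
    else
      pvA_clean (PySem.Chars.slice t none (some cs) ++ [' '] ++ PySem.Chars.slice t (some (ce + 1)) none)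
termination_by t.length
decreasing_by
  exact pvA_clean_dec t hcs hce

theorem pvA_loop_dec1 (s : List Char) (pos : ℕ)
    (hs : ¬ PySem.Chars.findFrom s pvTag (pos : ℤ) none = -1) :
    s.length + 1 - s.length < s.length + 1 - pos := by
  rw [pvFindFrom_nat] at hs
  by_cases hp : s.length < pos
  · rw [if_pos hp] at hs; exact absurd rfl hs
  rw [if_neg hp] at hs
  have hi : PySem.Chars.find (s.drop pos) pvTag ≠ -1 := by
    intro h; rw [if_pos h] at hs; exact hs rfl
  have := (pvOcc_of_find hi).length_le
  simp [List.length_drop, pvTag] at this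
  omega

theorem pvA_loop_dec2 (s : List Char) (pos : ℕ)
    (hs : ¬ PySem.Chars.findFrom s pvTag (pos : ℤ) none = -1)
    (ht : ¬ PySem.Chars.findFrom s pvGt (PySem.Chars.findFrom s pvTag (pos : ℤ) none) none = -1)
    (hn : ¬ PySem.Chars.findFrom s pvTag (PySem.Chars.findFrom s pvGt (PySem.Chars.findFrom s pvTag (pos : ℤ) none) none) none = -1) :
    s.length + 1 - (PySem.Chars.findFrom s pvTag (PySem.Chars.findFrom s pvGt (PySem.Chars.findFrom s pvTag (pos : ℤ) none) none) none).toNat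
      < s.length + 1 - pos := by
  rw [pvFindFrom_nat] at hs
  by_cases hp : s.length < pos
  · rw [if_pos hp] at hs; exact absurd rfl hs
  rw [if_neg hp] at hs
  have hi : PySem.Chars.find (s.drop pos) pvTag ≠ -1 := by
    intro h; rw [if_pos h] at hs; exact hs rfl
  have hi0 := pvFind_nonneg_of_ne hi
  set i := (PySem.Chars.find (s.drop pos) pvTag).toNat with hidef
  have hicast : PySem.Chars.find (s.drop pos) pvTag = (i : ℤ) := (Int.toNat_of_nonneg hi0).symm
  have hocci : pvTag <+: s.drop (pos + i) := by
    have := pvOcc_of_find hi; rw [← hidef, List.drop_drop] at this; exact this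
  have hilen : pos + i + 8 ≤ s.length := by
    have := hocci.length_le; simp [List.length_drop, pvTag] at this; omega
  have hstart : PySem.Chars.findFrom s pvTag (pos : ℤ) none = ((pos + i : ℕ) : ℤ) := by
    rw [pvFindFrom_nat, if_neg hp, if_neg hi, hicast]; push_cast; omega
  rw [hstart, pvFindFrom_nat s pvGt (pos + i), if_neg (show ¬s.length < pos + i by omega)] at ht
  have hg : PySem.Chars.find (s.drop (pos + i)) pvGt ≠ -1 := by
    intro h; rw [if_pos h] at ht; exact ht rfl
  have hg0 := pvFind_nonneg_of_ne hg
  set g := (PySem.Chars.find (s.drop (pos + i)) pvGt).toNat with hgdef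
  have hgcast : PySem.Chars.find (s.drop (pos + i)) pvGt = (g : ℤ) := (Int.toNat_of_nonneg hg0).symm
  have hoccg : pvGt <+: s.drop (pos + i + g) := by
    have := pvOcc_of_find hg; rw [← hgdef, List.drop_drop] at this; exact this
  have hglen : pos + i + g + 1 ≤ s.length := by
    have := hoccg.length_le; simp [List.length_drop, pvGt] at this; omega
  have hg1 : 1 ≤ g := by
    rcases Nat.eq_zero_or_pos g with h | h
    · exfalso; rw [h, Nat.add_zero] at hoccg; exact pvGt_not_at_tag hocci hoccg
    · exact h
  have htag : PySem.Chars.findFrom s pvGt ((pos + i : ℕ) : ℤ) none = ((pos + i + g : ℕ) : ℤ) := by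
    rw [pvFindFrom_nat, if_neg (show ¬s.length < pos + i by omega), if_neg hg, hgcast]
    push_cast; omega
  rw [hstart, htag, pvFindFrom_nat s pvTag (pos + i + g),
    if_neg (show ¬s.length < pos + i + g by omega)] at hn
  have hm : PySem.Chars.find (s.drop (pos + i + g)) pvTag ≠ -1 := by
    intro h; rw [if_pos h] at hn; exact hn rfl
  have hm0 := pvFind_nonneg_of_ne hm
  have hnxt : PySem.Chars.findFrom s pvTag ((pos + i + g : ℕ) : ℤ) none
      = (((pos + i + g + (PySem.Chars.find (s.drop (pos + i + g)) pvTag).toNat : ℕ)) : ℤ) := by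
    rw [pvFindFrom_nat, if_neg (show ¬s.length < pos + i + g by omega), if_neg hm,
      (Int.toNat_of_nonneg hm0).symm]
    push_cast; omega
  rw [hstart, htag, hnxt, Int.toNat_natCast]
  omega

-- the main while-loop of A, threading current_pos
def pvA_loop (s : List Char) (pos : ℕ) (acc : List (List Char)) : List (List Char) :=
  let start := PySem.Chars.findFrom s pvTag (pos : Int) none
  if hs : start = -1 then acc
  else
    let tagEnd := PySem.Chars.findFrom s pvGt start none
    if ht : tagEnd = -1 then acc
    else
      let nextStart := PySem.Chars.findFrom s pvTag tagEnd none
      let sectionText :=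
        if nextStart = -1 then PySem.Chars.slice s (some (tagEnd + 1)) none
        else PySem.Chars.slice s (some (tagEnd + 1)) (some nextStart)
      let st := PySem.Chars.strip (pvA_rstripBT (pvA_lstripBT (pvA_clean sectionText)))
      let acc' := if st ≠ [] then acc ++ [st] else acc
      if hn : nextStart = -1 then pvA_loop s s.length acc'
      else pvA_loop s nextStart.toNat acc'
termination_by s.length + 1 - pos
decreasing_by
  · simp only [start] at hs
    exact pvA_loop_dec1 s pos hs
  · simp only [nextStart, tagEnd, start] at ht hn ⊢
    simp only [start] at hs
    exact pvA_loop_dec2 s pos hs ht hn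

def parse_model_split_response (split_text : String) : List String :=
  let s := pvA_fences split_text.toList
  let first := PySem.Chars.find s pvTag
  let sections := if 0 < first then [PySem.Chars.strip (PySem.Chars.slice s none (some first))] else []
  (pvA_loop s 0 sections).map String.ofList

-- ===== PORT B =====
theorem pvB_collapse_dec (t : List Char)
    (hi : ¬ PySem.Chars.find t pvClose = -1)
    (hj : ¬ PySem.Chars.findFrom t pvGt (PySem.Chars.find t pvClose) none = -1) :
    (PySem.Chars.slice t (some (PySem.Chars.findFrom t pvGt (PySem.Chars.find t pvClose) none + 1)) none).length
      < t.length := by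
  obtain ⟨c, f, e1, e2, hf1, hc9, hcf⟩ :=
    pvCleanStep (big := pvClose) (fun l a b => pvGt_not_at_close a b) hi hj
  rw [e1] at e2
  simp only [e1, e2, PySem.Chars.slice_eq_listSlice]
  have : ((c + f : ℕ) : ℤ) + 1 = ((c + f + 1 : ℕ) : ℤ) := by push_cast; omega
  rw [this, PySem.List.slice_from_natCast]
  simp only [List.length_drop]
  have : 9 ≤ pvClose.length := by decide
  omega

-- B's one-forward-pass close-tag collapse ("out" accumulates the joined pieces)
def pvB_collapse (t : List Char) (out : List Char) : List Char :=
  let i := PySem.Chars.find t pvClose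
  if hi : i = -1 then out ++ t
  else
    let j := PySem.Chars.findFrom t pvGt i none
    if hj : j = -1 then out ++ t
    else
      pvB_collapse (PySem.Chars.slice t (some (j + 1)) none)
        (out ++ PySem.Chars.slice t none (some i) ++ [' '])
termination_by t.length
decreasing_by
  exact pvB_collapse_dec t hi hj

def parse_model_split_response_alt (split_text : String) : List String :=
  let text := PySem.Chars.replace (PySem.Chars.replace split_text.toList "```markdown".toList []) "```".toList []
  let parts := PySem.Chars.splitOn text pvTag
  if parts.length = 1 then []
  else
    let sections := if parts.headD [] ≠ [] then [PySem.Chars.strip (parts.headD [])] else []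
    (parts.tail.foldl (fun acc part =>
        let gt := PySem.Chars.find part pvGt
        if gt = -1 then acc
        else
          let body := PySem.Chars.strip (PySem.Chars.stripChars
            (pvB_collapse (PySem.Chars.slice part (some (gt + 1)) none) []) ['`'])
          if body ≠ [] then acc ++ [body] else acc) sections).map String.ofList

-- ===== PRECONDITION & SPEC =====
def Spec_parse_model_split_response (split_text : String) (out : List String) : Prop := out = parse_model_split_response_alt split_text
instance (split_text : String) (out : List String) : Decidable (Spec_parse_model_split_response split_text out) := by unfold Spec_parse_model_split_response; infer_instance

-- ===== CLAIM (what is proved, stated in full; the proofs are below) =====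
def Claim_equal_parse_model_split_response : Prop := ∀ (split_text : String), Dom_parse_model_split_response split_text → Spec_parse_model_split_response split_text (parse_model_split_response split_text)

-- ===== LEMMAS AND PROOFS =====

-- ===== core find/occurrence toolkit =====
theorem pvFind_neg_occ {s sub : List Char} (h : PySem.Chars.find s sub = -1) :
    ∀ k, ¬ sub <+: s.drop k := by
  intro k hk
  rw [PySem.Chars.find_eq_neg_one_iff] at h
  exact h ((PySem.Chars.isIn_iff_infix sub s).mp
    ((PySem.Chars.exists_prefix_drop_iff_isIn sub s).mp ⟨k, hk⟩))

theorem pvFind_neg {s sub : List Char} (h : ∀ k, ¬ sub <+: s.drop k) :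
    PySem.Chars.find s sub = -1 := by
  rw [PySem.Chars.find_eq_neg_one_iff]
  intro hinf
  obtain ⟨k, hk⟩ := (PySem.Chars.exists_prefix_drop_iff_isIn sub s).mpr
    ((PySem.Chars.isIn_iff_infix sub s).mpr hinf)
  exact h k hk

theorem pvFind_eq_of {s sub : List Char} {n : ℕ} (h1 : sub <+: s.drop n)
    (h2 : ∀ k < n, ¬ sub <+: s.drop k) : PySem.Chars.find s sub = (n : ℤ) := by
  have hne : PySem.Chars.find s sub ≠ -1 := by
    intro h; exact pvFind_neg_occ h n h1
  have h0 := pvFind_nonneg_of_ne hne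
  obtain ⟨ho, hmin⟩ := PySem.Chars.find_spec h0
  have hle : (PySem.Chars.find s sub).toNat ≤ n := by
    by_contra hlt
    exact hmin n (by omega) h1
  have hge : n ≤ (PySem.Chars.find s sub).toNat := by
    by_contra hlt
    exact h2 _ (by omega) ho
  omega

theorem pvOcc_drop_iff {s sub : List Char} (d k : ℕ) :
    sub <+: (s.drop d).drop k ↔ sub <+: s.drop (d + k) := by rw [List.drop_drop]

theorem pvOcc_append_iff {p r sub : List Char} {k : ℕ} (h : p.length ≤ k) :
    sub <+: (p ++ r).drop k ↔ sub <+: r.drop (k - p.length) := by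
  rw [List.drop_append, List.drop_eq_nil_of_le h, List.nil_append]

theorem pvOcc_take_mono {s sub : List Char} {m k : ℕ} (h : sub <+: (s.take m).drop k) :
    sub <+: s.drop k := by
  rw [List.drop_take] at h
  exact h.trans (List.take_prefix _ _)

theorem pvOcc_take_iff {s sub : List Char} {m k : ℕ} (h : k + sub.length ≤ m) :
    sub <+: (s.take m).drop k ↔ sub <+: s.drop k := by
  constructor
  · exact pvOcc_take_mono
  · intro ho
    rw [List.drop_take]
    rw [List.prefix_iff_eq_take] at ho ⊢
    rw [List.take_take, min_eq_left (by omega)]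
    exact ho

theorem pvFind_append {p r sub : List Char}
    (hc : ∀ k < p.length, ¬ sub <+: (p ++ r).drop k) :
    PySem.Chars.find (p ++ r) sub =
      if PySem.Chars.find r sub = -1 then -1 else (p.length : ℤ) + PySem.Chars.find r sub := by
  by_cases h : PySem.Chars.find r sub = -1
  · rw [if_pos h]
    apply pvFind_neg
    intro k hk
    by_cases hkp : k < p.length
    · exact hc k hkp hk
    · exact pvFind_neg_occ h (k - p.length) ((pvOcc_append_iff (by omega)).mp hk)
  · rw [if_neg h]
    have h0 := pvFind_nonneg_of_ne h
    set n := (PySem.Chars.find r sub).toNat with hn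
    have hcast : PySem.Chars.find r sub = (n : ℤ) := (Int.toNat_of_nonneg h0).symm
    have ho := pvOcc_of_find h
    rw [← hn] at ho
    have : PySem.Chars.find (p ++ r) sub = ((p.length + n : ℕ) : ℤ) := by
      apply pvFind_eq_of
      · rw [pvOcc_append_iff (by omega)]
        simpa using ho
      · intro k hk
        by_cases hkp : k < p.length
        · exact hc k hkp
        · intro hkk
          rw [pvOcc_append_iff (by omega)] at hkk
          obtain ⟨_, hmin⟩ := PySem.Chars.find_spec h0
          exact hmin (k - p.length) (by omega) hkk
    rw [this, hcast]
    push_cast; ring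

theorem pvFind_cons {c : Char} {x sub : List Char} (h0 : ¬ sub <+: c :: x) :
    PySem.Chars.find (c :: x) sub =
      if PySem.Chars.find x sub = -1 then -1 else 1 + PySem.Chars.find x sub := by
  have := pvFind_append (p := [c]) (r := x) (sub := sub) ?_
  · simpa using this
  · intro k hk
    simp only [List.length_cons, List.length_nil] at hk
    have : k = 0 := by omega
    subst this
    simpa using h0

-- ===== chunk decomposition of split("<section") =====
theorem pvChunks_dec (l : List Char) (h : ¬ PySem.Chars.find l pvTag = -1) :
    (l.drop ((PySem.Chars.find l pvTag).toNat + 8)).length < l.length := by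
  have h0 := pvFind_nonneg_of_ne h
  have := (pvOcc_of_find h).length_le
  simp only [List.length_drop] at this ⊢
  have h8 : pvTag.length = 8 := by decide
  omega

def pvChunks (l : List Char) : List (List Char) :=
  let i := PySem.Chars.find l pvTag
  if h : i = -1 then [l]
  else l.take i.toNat :: pvChunks (l.drop (i.toNat + 8))
termination_by l.length
decreasing_by
  exact pvChunks_dec l h

theorem pvChunks_ne_nil (l : List Char) : pvChunks l ≠ [] := by
  rw [pvChunks]
  by_cases h : PySem.Chars.find l pvTag = -1 <;> simp [h]

theorem pvSplitGo : ∀ (fuel : ℕ) (l cur : List Char) (acc : List (List Char)), l.length < fuel →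
    PySem.Chars.splitOn.go pvTag fuel l cur acc =
      acc.reverse ++ (cur.reverse ++ (pvChunks l).headD []) :: (pvChunks l).tail := by
  intro fuel
  induction fuel with
  | zero => intro l cur acc h; omega
  | succ n ih =>
    intro l cur acc h
    cases l with
    | nil =>
      simp only [PySem.Chars.splitOn.go]
      rw [pvChunks]
      have : PySem.Chars.find ([] : List Char) pvTag = -1 := by decide
      simp [this]
    | cons c rest =>
      by_cases hp : pvTag.isPrefixOf (c :: rest)
      · have hpre : pvTag <+: c :: rest := List.isPrefixOf_iff_prefix.mp hp
        have hfind : PySem.Chars.find (c :: rest) pvTag = ((0 : ℕ) : ℤ) :=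
          pvFind_eq_of (by simpa using hpre) (by omega)
        have hgo : PySem.Chars.splitOn.go pvTag (n + 1) (c :: rest) cur acc =
            PySem.Chars.splitOn.go pvTag n (List.drop pvTag.length (c :: rest)) []
              (cur.reverse :: acc) := by
          simp [PySem.Chars.splitOn.go, hp]
        have h8 : pvTag.length = 8 := by decide
        rw [hgo, ih _ _ _ (by
          simp only [List.length_drop, h8, List.length_cons]
          simp only [List.length_cons] at h
          omega)]
        rw [pvChunks.eq_def (c :: rest)]
        simp only [hfind]
        have hnn := pvChunks_ne_nil (List.drop 7 rest)
        obtain ⟨d, ds, hd⟩ : ∃ d ds, pvChunks (List.drop 7 rest) = d :: ds :=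
          List.exists_cons_of_ne_nil hnn
        simp [hd, h8]
      · have h0 : ¬ pvTag <+: c :: rest := fun hh => hp (List.isPrefixOf_iff_prefix.mpr hh)
        have hgo : PySem.Chars.splitOn.go pvTag (n + 1) (c :: rest) cur acc =
            PySem.Chars.splitOn.go pvTag n rest (c :: cur) acc := by
          simp [PySem.Chars.splitOn.go, hp]
        rw [hgo, ih _ _ _ (by simp only [List.length_cons] at h; omega)]
        have hcons := pvFind_cons (x := rest) h0
        by_cases hr : PySem.Chars.find rest pvTag = -1
        · have hfl : PySem.Chars.find (c :: rest) pvTag = -1 := by rw [hcons, if_pos hr]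
          rw [pvChunks.eq_def (c :: rest), pvChunks.eq_def rest]
          simp [hfl, hr]
        · have hr0 := pvFind_nonneg_of_ne hr
          set m := (PySem.Chars.find rest pvTag).toNat with hm
          have hmc : PySem.Chars.find rest pvTag = (m : ℤ) := (Int.toNat_of_nonneg hr0).symm
          have hfl : PySem.Chars.find (c :: rest) pvTag = ((m + 1 : ℕ) : ℤ) := by
            rw [hcons, if_neg hr, hmc]; push_cast; ring
          rw [pvChunks.eq_def (c :: rest), pvChunks.eq_def rest]
          simp only [hfl, hmc]
          have e1 : ((m + 1 : ℕ) : ℤ).toNat = m + 1 := by omega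
          have e2 : (m : ℤ).toNat = m := by omega
          have e3 : m + 1 + 8 = (m + 8) + 1 := by omega
          simp [e1, e2, e3, List.take_succ_cons, List.drop_succ_cons,
            show ¬(((m:ℤ) + 1 = -1)) by omega, show ¬(((m:ℤ) = -1)) by omega]
  
theorem pvSplitOn_eq (l : List Char) : PySem.Chars.splitOn l pvTag = pvChunks l := by
  unfold PySem.Chars.splitOn
  rw [pvSplitGo (l.length + 1) l [] [] (by omega)]
  obtain ⟨d, ds, hd⟩ : ∃ d ds, pvChunks l = d :: ds := List.exists_cons_of_ne_nil (pvChunks_ne_nil l)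
  simp [hd]

-- ===== close-tag collapse: A's splice loop ≡ B's forward pass =====
theorem pvDrop_append {p r : List Char} {k : ℕ} (h : p.length ≤ k) :
    (p ++ r).drop k = r.drop (k - p.length) := by
  rw [List.drop_append, List.drop_eq_nil_of_le h, List.nil_append]

theorem pvTake_append (p r : List Char) (j : ℕ) :
    (p ++ r).take (p.length + j) = p ++ r.take j := by
  rw [List.take_append]
  congr 1
  · exact List.take_of_length_le (by omega)
  · congr 1; omega

theorem pvClose_no_space : ∀ i : Fin pvClose.length, pvClose[i] ≠ ' ' := by decide

theorem pvNoCross {p r : List Char} (hne : p ≠ []) (hl : p.getLast hne = ' ')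
    (hinf : ¬ pvClose <:+: p) : ∀ k < p.length, ¬ pvClose <+: (p ++ r).drop k := by
  intro k hk h
  by_cases hfull : k + pvClose.length ≤ p.length
  · have hdk : (p ++ r).drop k = p.drop k ++ r := by
      rw [List.drop_append, Nat.sub_eq_zero_of_le (by omega), List.drop_zero]
    rw [hdk] at h
    have hin : pvClose <+: p.drop k := by
      rw [List.prefix_iff_eq_take] at h ⊢
      rw [List.take_append, Nat.sub_eq_zero_of_le (by simp; omega), List.take_zero,
        List.append_nil] at h
      exact h
    obtain ⟨u, hu⟩ := hin
    obtain ⟨v, hv⟩ := List.drop_suffix k p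
    exact hinf ⟨v, u, by rw [← hv, ← hu]; simp⟩
  · have hplen : 1 ≤ p.length := List.length_pos_of_ne_nil hne
    have hclen : pvClose.length = 9 := by decide
    set idx := p.length - 1 - k with hidxdef
    have hi : idx < pvClose.length := by omega
    obtain ⟨hlt, he⟩ := pvPrefix_getElem h idx hi
    rw [List.getElem_drop] at he
    have he' : (p ++ r)[k + idx]? = some (pvClose[idx]) := by
      rw [List.getElem?_eq_getElem (by simp only [List.length_append]; omega)]
      exact congrArg some he
    rw [show k + idx = p.length - 1 by omega] at he'
    rw [List.getElem?_append_left (by omega)] at he'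
    rw [List.getElem?_eq_getElem (by omega)] at he'
    have hlast : p[p.length - 1] = ' ' := by rw [← List.getLast_eq_getElem hne]; exact hl
    rw [hlast] at he'
    exact pvClose_no_space ⟨idx, hi⟩ (by injection he' with hh; exact hh.symm)

theorem pvPrefixOk {t : List Char} {i : ℕ} (hfind : PySem.Chars.find t pvClose = (i : ℤ)) :
    ¬ pvClose <:+: (t.take i ++ [' ']) := by
  intro hinf
  have h0 : (0:ℤ) ≤ PySem.Chars.find t pvClose := by rw [hfind]; omega
  obtain ⟨hocc, hmin⟩ := PySem.Chars.find_spec h0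
  rw [hfind, Int.toNat_natCast] at hocc hmin
  have hclen : pvClose.length = 9 := by decide
  have hilen : i + 9 ≤ t.length := by
    have := hocc.length_le; simp [List.length_drop, hclen] at this; omega
  have htk : (t.take i).length = i := by simp; omega
  obtain ⟨k, hk⟩ := (PySem.Chars.exists_prefix_drop_iff_isIn pvClose (t.take i ++ [' '])).mpr
    ((PySem.Chars.isIn_iff_infix _ _).mpr hinf)
  have hqlen : (t.take i ++ [' ']).length = i + 1 := by simp [htk]
  have hkb : k + 9 ≤ i + 1 := by
    have := hk.length_le; simp [List.length_drop, hclen, hqlen] at this; omega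
  by_cases hfull : k + 9 ≤ i
  · have hdk : (t.take i ++ [' ']).drop k = (t.take i).drop k ++ [' '] := by
      rw [List.drop_append, Nat.sub_eq_zero_of_le (by omega), List.drop_zero]
    rw [hdk] at hk
    have hin : pvClose <+: (t.take i).drop k := by
      rw [List.prefix_iff_eq_take] at hk ⊢
      rw [List.take_append, Nat.sub_eq_zero_of_le (by simp [hclen]; omega), List.take_zero,
        List.append_nil] at hk
      exact hk
    exact hmin k (by omega) (pvOcc_take_mono hin)
  · have hk9 : k + 9 = i + 1 := by omega
    obtain ⟨hlt, he⟩ := pvPrefix_getElem hk 8 (by omega)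
    rw [List.getElem_drop] at he
    have he' : (t.take i ++ [' '])[k + 8]? = some (pvClose[8]) := by
      rw [List.getElem?_eq_getElem (by rw [hqlen]; omega)]
      exact congrArg some he
    rw [show k + 8 = i by omega] at he'
    rw [List.getElem?_append_right (by omega)] at he'
    rw [htk, Nat.sub_self] at he'
    simp only [List.getElem?_cons_zero] at he'
    exact pvClose_no_space ⟨8, by decide⟩ (by injection he' with hh; exact hh.symm)

-- one unfolding step of A's clean loop, given where its two finds land
theorem pvCleanA_step {r : List Char} {i f : ℕ}
    (hfi : PySem.Chars.find r pvClose = (i : ℤ))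
    (hMf : PySem.Chars.findFrom r pvGt (i : ℤ) none = ((i + f : ℕ) : ℤ))
    (hb : i + f + 1 ≤ r.length) :
    pvA_clean r = pvA_clean (r.take i ++ [' '] ++ r.drop (i + f + 1)) := by
  rw [pvA_clean.eq_def]
  simp only [hfi, hMf]
  rw [dif_neg (show ¬(i : ℤ) = -1 by omega), dif_neg (show ¬((i + f : ℕ) : ℤ) = -1 by omega)]
  have e1 : ((i + f : ℕ) : ℤ) + 1 = ((i + f + 1 : ℕ) : ℤ) := by push_cast; omega
  simp only [PySem.Chars.slice_eq_listSlice, PySem.List.slice_to_natCast, e1,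
    PySem.List.slice_from_natCast]

-- the prefix-absorption law for A's clean loop
theorem pvCleanA_append : ∀ (n : ℕ) (r : List Char), r.length ≤ n →
    ∀ (p : List Char) (hne : p ≠ []), p.getLast hne = ' ' → ¬ pvClose <:+: p →
    pvA_clean (p ++ r) = p ++ pvA_clean r := by
  intro n
  induction n with
  | zero =>
    intro r hr p hne hl hinf
    have : r = [] := by cases r <;> simp_all
    subst this
    have hf : PySem.Chars.find (p ++ []) pvClose = -1 := by
      apply pvFind_neg
      intro k hk
      by_cases hkp : k < p.length
      · exact pvNoCross hne hl hinf k hkp hk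
      · rw [pvOcc_append_iff (by omega)] at hk
        rw [List.drop_nil, List.prefix_nil] at hk
        exact absurd hk (by decide)
    rw [pvA_clean.eq_def (p ++ []), dif_pos hf, pvA_clean.eq_def ([] : List Char),
      dif_pos (show PySem.Chars.find ([] : List Char) pvClose = -1 by decide)]
  | succ n ih =>
    intro r hr p hne hl hinf
    have hfa := pvFind_append (p := p) (r := r) (sub := pvClose) (pvNoCross hne hl hinf)
    by_cases hr1 : PySem.Chars.find r pvClose = -1
    · have hfneg : PySem.Chars.find (p ++ r) pvClose = -1 := by rw [hfa, if_pos hr1]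
      rw [pvA_clean.eq_def (p ++ r), dif_pos hfneg, pvA_clean.eq_def r, dif_pos hr1]
    · have hc0 := pvFind_nonneg_of_ne hr1
      set c := (PySem.Chars.find r pvClose).toNat with hcdef
      have hccast : PySem.Chars.find r pvClose = (c : ℤ) := (Int.toNat_of_nonneg hc0).symm
      have hoccc : pvClose <+: r.drop c := by
        have := pvOcc_of_find hr1; rw [← hcdef] at this; exact this
      have hclen9 : pvClose.length = 9 := by decide
      have hcb : c + 9 ≤ r.length := by
        have := hoccc.length_le; simp [List.length_drop, hclen9] at this; omega
      have hfapr : PySem.Chars.find (p ++ r) pvClose = ((p.length + c : ℕ) : ℤ) := by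
        rw [hfa, if_neg hr1, hccast]; push_cast; omega
      have hdrop : (p ++ r).drop (p.length + c) = r.drop c := by
        rw [pvDrop_append (by omega)]; congr 1; omega
      by_cases hg : PySem.Chars.find (r.drop c) pvGt = -1
      · -- no '>' after the close tag: both sides return their input unchanged
        rw [pvA_clean.eq_def (p ++ r), pvA_clean.eq_def r]
        simp only [hfapr, hccast]
        rw [dif_neg (show ¬((p.length + c : ℕ) : ℤ) = -1 by omega),
          dif_neg (show ¬(c : ℤ) = -1 by omega)]
        have hm1 : PySem.Chars.findFrom (p ++ r) pvGt ((p.length + c : ℕ) : ℤ) none = -1 := by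
          rw [pvFindFrom_nat, hdrop, if_neg (show ¬(p ++ r).length < p.length + c by
            simp; omega), if_pos hg]
        have hm2 : PySem.Chars.findFrom r pvGt ((c : ℕ) : ℤ) none = -1 := by
          rw [pvFindFrom_nat, if_neg (show ¬r.length < c by omega), if_pos hg]
        rw [hm1, hm2, dif_pos rfl, dif_pos rfl]
      · have hg0 := pvFind_nonneg_of_ne hg
        set f := (PySem.Chars.find (r.drop c) pvGt).toNat with hfdef
        have hgcast : PySem.Chars.find (r.drop c) pvGt = (f : ℤ) := (Int.toNat_of_nonneg hg0).symm
        have hoccf : pvGt <+: r.drop (c + f) := by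
          have := pvOcc_of_find hg; rw [← hfdef, List.drop_drop] at this; exact this
        have hfb : c + f + 1 ≤ r.length := by
          have := hoccf.length_le; simp [List.length_drop, pvGt] at this; omega
        have hf1 : 1 ≤ f := by
          rcases Nat.eq_zero_or_pos f with h | h
          · exfalso; rw [h, Nat.add_zero] at hoccf
            exact pvGt_not_at_close hoccc hoccf
          · exact h
        have hMr : PySem.Chars.findFrom r pvGt (c : ℤ) none = ((c + f : ℕ) : ℤ) := by
          rw [pvFindFrom_nat, if_neg (show ¬r.length < c by omega), if_neg hg, hgcast]
          push_cast; omega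
        have hMpr : PySem.Chars.findFrom (p ++ r) pvGt ((p.length + c : ℕ) : ℤ) none
            = ((p.length + c + f : ℕ) : ℤ) := by
          rw [pvFindFrom_nat, hdrop, if_neg (show ¬(p ++ r).length < p.length + c by
            simp; omega), if_neg hg, hgcast]
          push_cast; omega
        have hstep1 := pvCleanA_step (r := r) hccast hMr hfb
        have hstep2 := pvCleanA_step (r := p ++ r) hfapr
          (by rw [show ((p.length + c : ℕ) : ℤ) = ((p.length + c : ℕ) : ℤ) from rfl]; exact
            (by rw [show (p.length + c + f : ℕ) = (p.length + c) + f from by omega] at hMpr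
                exact hMpr))
          (by simp; omega)
        have htk2 : (p ++ r).take (p.length + c) = p ++ r.take c := pvTake_append p r c
        have hdp2 : (p ++ r).drop (p.length + c + f + 1) = r.drop (c + f + 1) := by
          rw [pvDrop_append (by omega)]; congr 1; omega
        rw [hstep1, hstep2, htk2, hdp2]
        rw [show p ++ r.take c ++ [' '] ++ r.drop (c + f + 1)
            = p ++ (r.take c ++ [' '] ++ r.drop (c + f + 1)) from by simp [List.append_assoc]]
        rw [ih _ (by
            simp only [List.length_append, List.length_take, List.length_drop,
              List.length_cons, List.length_nil]
            omega) p hne hl hinf]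

theorem pvB_collapse_eq : ∀ (n : ℕ) (t : List Char), t.length ≤ n → ∀ (out : List Char),
    pvB_collapse t out = out ++ pvA_clean t := by
  intro n
  induction n with
  | zero =>
    intro t ht out
    have : t = [] := by cases t <;> simp_all
    subst this
    have hf : PySem.Chars.find ([] : List Char) pvClose = -1 := by decide
    rw [pvB_collapse.eq_def, dif_pos hf, pvA_clean.eq_def ([] : List Char), dif_pos hf]
  | succ n ih =>
    intro t ht out
    rw [pvB_collapse.eq_def, pvA_clean.eq_def t]
    by_cases h1 : PySem.Chars.find t pvClose = -1
    · rw [dif_pos h1, dif_pos h1]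
    · rw [dif_neg h1, dif_neg h1]
      by_cases h2 : PySem.Chars.findFrom t pvGt (PySem.Chars.find t pvClose) none = -1
      · rw [dif_pos h2, dif_pos h2]
      · rw [dif_neg h2, dif_neg h2]
        obtain ⟨c, f, e1, e2, hf1, hc9, hcf⟩ :=
          pvCleanStep (big := pvClose) (fun l a b => pvGt_not_at_close a b) h1 h2
        rw [e1] at e2
        simp only [e1, e2]
        have ecast : ((c + f : ℕ) : ℤ) + 1 = ((c + f + 1 : ℕ) : ℤ) := by push_cast; omega
        simp only [PySem.Chars.slice_eq_listSlice, PySem.List.slice_to_natCast, ecast,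
          PySem.List.slice_from_natCast]
        rw [ih _ (by simp only [List.length_drop]; omega)]
        have hclen9 : pvClose.length = 9 := by decide
        have hgetlast : (t.take c ++ [' ']).getLast (by simp) = ' ' := by
          simp
        rw [pvCleanA_append n (t.drop (c + f + 1)) (by simp only [List.length_drop]; omega)
          (t.take c ++ [' ']) (by simp) hgetlast (pvPrefixOk e1)]
        simp [List.append_assoc]

-- ===== per-chunk emission =====
def pvStripAll (x : List Char) : List Char := PySem.Chars.strip (PySem.Chars.stripChars x ['`'])

def pvEmitC (c : List Char) : List (List Char) :=
  let body := pvStripAll (pvA_clean c)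
  if body ≠ [] then [body] else []

def pvEmit (part : List Char) : List (List Char) :=
  let g := PySem.Chars.find part pvGt
  if g = -1 then [] else pvEmitC (part.drop (g.toNat + 1))

theorem pvStrip_chain (x : List Char) :
    PySem.Chars.strip (pvA_rstripBT (pvA_lstripBT x)) = pvStripAll x := rfl

theorem pvGtElem : ∀ j : Fin pvGt.length, pvGt[j] = '>' := by decide
theorem pvTagElemNe : ∀ j : Fin pvTag.length, pvTag[j] ≠ '>' := by decide

theorem pvOcc_getElem? {sub s : List Char} {k : ℕ} (h : sub <+: s.drop k) (j : ℕ)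
    (hj : j < sub.length) : s[k + j]? = some (sub[j]) := by
  obtain ⟨hlt, he⟩ := pvPrefix_getElem h j hj
  rw [List.getElem_drop] at he
  have hb : k + j < s.length := by
    have := h.length_le; simp only [List.length_drop] at this; omega
  rw [List.getElem?_eq_getElem hb]
  exact congrArg some he

-- the 8 characters of "<section" contain no '>'
theorem pvNoGtInTag (w : List Char) : ∀ k < pvTag.length, ¬ pvGt <+: (pvTag ++ w).drop k := by
  intro k hk h
  have e1 := pvOcc_getElem? h 0 (by decide)
  rw [Nat.add_zero, List.getElem?_append_left (by omega), List.getElem?_eq_getElem hk] at e1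
  have : pvTag[k] = pvGt[0] := by injection e1 with hh
  exact pvTagElemNe ⟨k, hk⟩ (this.trans (pvGtElem ⟨0, by decide⟩))

-- a '>' inside the tag literal is impossible: first '>' of "<section"++w sits 8 deep
theorem pvFind_tagPrefix_gt (w : List Char) :
    PySem.Chars.find (pvTag ++ w) pvGt =
      if PySem.Chars.find w pvGt = -1 then -1 else (8 : ℤ) + PySem.Chars.find w pvGt := by
  have := pvFind_append (p := pvTag) (r := w) (sub := pvGt) (pvNoGtInTag w)
  simpa using this

-- CL: flatMap pvEmit over the chunks of w, described by w's first '>' and the next tag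
theorem pvCL : ∀ (n : ℕ) (w : List Char), w.length ≤ n →
    (PySem.Chars.find w pvGt = -1 → (pvChunks w).flatMap pvEmit = []) ∧
    (∀ g : ℕ, PySem.Chars.find w pvGt = (g : ℤ) →
      ((PySem.Chars.find (w.drop (g + 1)) pvTag = -1 →
          (pvChunks w).flatMap pvEmit = pvEmitC (w.drop (g + 1))) ∧
       (∀ m : ℕ, PySem.Chars.find (w.drop (g + 1)) pvTag = (m : ℤ) →
          (pvChunks w).flatMap pvEmit =
            pvEmitC ((w.drop (g + 1)).take m) ++
              (pvChunks (w.drop (g + 1 + m + 8))).flatMap pvEmit))) := by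
  intro n
  induction n with
  | zero =>
    intro w hw
    have hwn : w = [] := by cases w <;> simp_all
    subst hwn
    have hchn : pvChunks ([] : List Char) = [[]] := by
      rw [pvChunks.eq_def, dif_pos (show PySem.Chars.find ([] : List Char) pvTag = -1 by decide)]
    constructor
    · intro _
      simp [hchn, pvEmit, show PySem.Chars.find ([] : List Char) pvGt = -1 by decide]
    · intro g hg
      rw [show PySem.Chars.find ([] : List Char) pvGt = -1 by decide] at hg
      exact absurd hg (by omega)
  | succ n ih =>
    intro w hw
    by_cases hT : PySem.Chars.find w pvTag = -1
    · -- single chunk [w]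
      have hch : pvChunks w = [w] := by rw [pvChunks.eq_def, dif_pos hT]
      refine ⟨fun hg => ?_, fun g hg => ⟨fun hm => ?_, fun m hm => ?_⟩⟩
      · simp [hch, pvEmit, hg]
      · simp [hch, pvEmit, hg]
      · exfalso
        have : pvTag <+: w.drop (g + 1 + m) := by
          have h1 : (0:ℤ) ≤ PySem.Chars.find (w.drop (g+1)) pvTag := by rw [hm]; omega
          have := (PySem.Chars.find_spec h1).1
          rw [hm, Int.toNat_natCast, List.drop_drop] at this
          exact this
        exact pvFind_neg_occ hT (g + 1 + m) this
    · have hT0 := pvFind_nonneg_of_ne hT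
      set i₂ := (PySem.Chars.find w pvTag).toNat with hi2def
      have hTcast : PySem.Chars.find w pvTag = (i₂ : ℤ) := (Int.toNat_of_nonneg hT0).symm
      have hoccT : pvTag <+: w.drop i₂ := by
        have := pvOcc_of_find hT; rw [← hi2def] at this; exact this
      have hminT : ∀ k < i₂, ¬ pvTag <+: w.drop k := by
        intro k hk
        have := (PySem.Chars.find_spec hT0).2 k (by omega)
        exact this
      have htag8 : pvTag.length = 8 := by decide
      have hTb : i₂ + 8 ≤ w.length := by
        have := hoccT.length_le; simp only [List.length_drop, htag8] at this; omega
      have hch : pvChunks w = w.take i₂ :: pvChunks (w.drop (i₂ + 8)) := by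
        rw [pvChunks.eq_def, dif_neg (by rw [hTcast]; omega)]
      set w₂ := w.drop (i₂ + 8) with hw2def
      have hw2len : w₂.length ≤ n := by simp only [hw2def, List.length_drop]; omega
      refine ⟨fun hg => ?_, fun g hg => ?_⟩
      · -- no '>' anywhere
        have hgt1 : PySem.Chars.find (w.take i₂) pvGt = -1 := by
          apply pvFind_neg; intro k hk
          exact pvFind_neg_occ hg k (pvOcc_take_mono hk)
        have hgt2 : PySem.Chars.find w₂ pvGt = -1 := by
          apply pvFind_neg; intro k hk
          rw [pvOcc_drop_iff] at hk
          exact pvFind_neg_occ hg _ hk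
        have := (ih w₂ hw2len).1 hgt2
        simp [hch, pvEmit, hgt1, this]
      · -- first '>' at g
        have hg0 : (0:ℤ) ≤ PySem.Chars.find w pvGt := by rw [hg]; omega
        have hoccG : pvGt <+: w.drop g := by
          have := (PySem.Chars.find_spec hg0).1; rw [hg, Int.toNat_natCast] at this; exact this
        have hminG : ∀ k < g, ¬ pvGt <+: w.drop k := by
          intro k hk
          have := (PySem.Chars.find_spec hg0).2 k (by rw [hg, Int.toNat_natCast]; omega)
          exact this
        have hGb : g + 1 ≤ w.length := by
          have := hoccG.length_le; simp only [List.length_drop] at this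
          have : pvGt.length = 1 := by decide
          omega
        by_cases hlt : g < i₂
        · -- the '>' lies inside the head chunk
          have hgt1 : PySem.Chars.find (w.take i₂) pvGt = (g : ℤ) := by
            apply pvFind_eq_of
            · rw [pvOcc_take_iff (by simp [show pvGt.length = 1 by decide]; omega)]
              exact hoccG
            · intro k hk hkk
              exact hminG k (by omega) (pvOcc_take_mono hkk)
          have hMm : PySem.Chars.find (w.drop (g + 1)) pvTag = ((i₂ - g - 1 : ℕ) : ℤ) := by
            apply pvFind_eq_of
            · rw [pvOcc_drop_iff, show g + 1 + (i₂ - g - 1) = i₂ by omega]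
              exact hoccT
            · intro k hk hkk
              rw [pvOcc_drop_iff] at hkk
              exact hminT _ (by omega) hkk
          have hemit : pvEmit (w.take i₂) = pvEmitC ((w.drop (g + 1)).take (i₂ - g - 1)) := by
            simp only [pvEmit, hgt1]
            rw [if_neg (by omega), Int.toNat_natCast]
            congr 1
            rw [List.drop_take, show i₂ - (g + 1) = i₂ - g - 1 from by omega]
          constructor
          · intro hm
            rw [hMm] at hm
            exact absurd hm (by omega)
          · intro m hm
            rw [hMm] at hm
            have hmeq : m = i₂ - g - 1 := by omega
            subst hmeq
            have hdeq : w.drop (g + 1 + (i₂ - g - 1) + 8) = w₂ := by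
              rw [hw2def]; congr 1; omega
            simp [hch, hemit, hdeq]
        · -- the '>' lies at or after the next tag: in fact at least 8 past it
          have hge8 : i₂ + 8 ≤ g := by
            by_contra hcon
            have hgi : i₂ ≤ g := by omega
            have e1 := pvOcc_getElem? hoccG 0 (by decide)
            have e2 := pvOcc_getElem? hoccT (g - i₂) (by omega)
            rw [Nat.add_zero] at e1
            rw [show i₂ + (g - i₂) = g by omega] at e2
            rw [e1] at e2
            have : pvGt[0] = pvTag[g - i₂] := by injection e2 with hh
            exact pvTagElemNe ⟨g - i₂, by omega⟩
              (((pvGtElem ⟨0, by decide⟩).symm.trans this).symm)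
          have hgt1 : PySem.Chars.find (w.take i₂) pvGt = -1 := by
            apply pvFind_neg; intro k hk
            have hkb : k + 1 ≤ i₂ := by
              have := hk.length_le
              simp only [List.length_drop, List.length_take,
                show pvGt.length = 1 by decide] at this
              omega
            exact hminG k (by omega) (pvOcc_take_mono hk)
          have hg2 : PySem.Chars.find w₂ pvGt = ((g - i₂ - 8 : ℕ) : ℤ) := by
            apply pvFind_eq_of
            · rw [pvOcc_drop_iff, show i₂ + 8 + (g - i₂ - 8) = g by omega]
              exact hoccG
            · intro k hk hkk
              rw [pvOcc_drop_iff] at hkk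
              exact hminG _ (by omega) hkk
          have hdropeq : w₂.drop (g - i₂ - 8 + 1) = w.drop (g + 1) := by
            rw [hw2def, List.drop_drop]; congr 1; omega
          constructor
          · intro hm
            have := ((ih w₂ hw2len).2 (g - i₂ - 8) hg2).1 (by rw [hdropeq]; exact hm)
            rw [hdropeq] at this
            simp [hch, pvEmit, hgt1, this]
          · intro m hm
            have := ((ih w₂ hw2len).2 (g - i₂ - 8) hg2).2 m (by rw [hdropeq]; exact hm)
            rw [hdropeq] at this
            have hdeq : w₂.drop (g - i₂ - 8 + 1 + m + 8) = w.drop (g + 1 + m + 8) := by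
              rw [hw2def, List.drop_drop]; congr 1; omega
            rw [hdeq] at this
            simp [hch, pvEmit, hgt1, this]

-- ===== the main loop of A processes exactly the chunk tail =====
theorem pvChunks_nil : pvChunks ([] : List Char) = [[]] := by
  rw [pvChunks.eq_def, dif_pos (show PySem.Chars.find ([] : List Char) pvTag = -1 by decide)]

theorem pvA_loop_eq : ∀ (n : ℕ) (s : List Char) (pos : ℕ), pos ≤ s.length → s.length - pos ≤ n →
    ∀ acc, pvA_loop s pos acc = acc ++ ((pvChunks (s.drop pos)).tail).flatMap pvEmit := by
  intro n
  induction n with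
  | zero =>
    intro s pos hpos hn acc
    have hdrop : s.drop pos = [] := by
      have : pos = s.length := by omega
      rw [this, List.drop_length]
    have hi : PySem.Chars.find (s.drop pos) pvTag = -1 := by rw [hdrop]; decide
    have hs : PySem.Chars.findFrom s pvTag (pos : ℤ) none = -1 := by
      rw [pvFindFrom_nat, if_neg (by omega), if_pos hi]
    rw [pvA_loop.eq_def, hs, dif_pos rfl, hdrop, pvChunks_nil]
    simp
  | succ n ih =>
    intro s pos hpos hn acc
    by_cases hi : PySem.Chars.find (s.drop pos) pvTag = -1
    · have hs : PySem.Chars.findFrom s pvTag (pos : ℤ) none = -1 := by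
        rw [pvFindFrom_nat, if_neg (by omega), if_pos hi]
      rw [pvA_loop.eq_def, hs, dif_pos rfl]
      rw [pvChunks.eq_def, dif_pos hi]
      simp
    · have hi0 := pvFind_nonneg_of_ne hi
      set i := (PySem.Chars.find (s.drop pos) pvTag).toNat with hidef
      have hicast : PySem.Chars.find (s.drop pos) pvTag = (i : ℤ) := (Int.toNat_of_nonneg hi0).symm
      have hoccI : pvTag <+: s.drop (pos + i) := by
        have := pvOcc_of_find hi; rw [← hidef, List.drop_drop] at this; exact this
      have htag8 : pvTag.length = 8 := by decide
      have hilen : pos + i + 8 ≤ s.length := by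
        have := hoccI.length_le; simp only [List.length_drop, htag8] at this; omega
      have hs : PySem.Chars.findFrom s pvTag (pos : ℤ) none = ((pos + i : ℕ) : ℤ) := by
        rw [pvFindFrom_nat, if_neg (by omega), if_neg hi, hicast]; push_cast; omega
      set w := s.drop (pos + i + 8) with hwdef
      have hu : s.drop (pos + i) = pvTag ++ w := by
        obtain ⟨w', hw'⟩ := hoccI
        have h1 : List.drop 8 (pvTag ++ w') = w' := by
          rw [pvDrop_append (by rw [htag8]), htag8, Nat.sub_self, List.drop_zero]
        have h2 : List.drop 8 (s.drop (pos + i)) = w := by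
          rw [List.drop_drop, hwdef]
        rw [← hw', h1] at h2
        rw [← hw', h2]
      have hchtail : (pvChunks (s.drop pos)).tail = pvChunks w := by
        rw [pvChunks.eq_def, dif_neg hi, List.tail_cons]
        rw [← hidef, List.drop_drop, hwdef,
          show pos + (i + 8) = pos + i + 8 from by omega]
      have hfindu : PySem.Chars.find (s.drop (pos + i)) pvGt =
          if PySem.Chars.find w pvGt = -1 then -1 else (8 : ℤ) + PySem.Chars.find w pvGt := by
        rw [hu]; exact pvFind_tagPrefix_gt w
      by_cases hG : PySem.Chars.find w pvGt = -1
      · have htE : PySem.Chars.findFrom s pvGt ((pos + i : ℕ) : ℤ) none = -1 := by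
          rw [pvFindFrom_nat, if_neg (by omega), if_pos (by rw [hfindu, if_pos hG])]
        rw [pvA_loop.eq_def, hs, dif_neg (show ¬((pos + i : ℕ) : ℤ) = -1 by omega), htE,
          dif_pos rfl, hchtail, (pvCL w.length w le_rfl).1 hG]
        simp
      · have hG0 := pvFind_nonneg_of_ne hG
        set g := (PySem.Chars.find w pvGt).toNat with hgdef
        have hgcast : PySem.Chars.find w pvGt = (g : ℤ) := (Int.toNat_of_nonneg hG0).symm
        have hoccG : pvGt <+: w.drop g := by
          have := pvOcc_of_find hG; rw [← hgdef] at this; exact this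
        have hglen : pos + i + 8 + g + 1 ≤ s.length := by
          have := hoccG.length_le
          simp only [List.length_drop, hwdef, show pvGt.length = 1 by decide] at this
          omega
        have htE : PySem.Chars.findFrom s pvGt ((pos + i : ℕ) : ℤ) none
            = ((pos + i + 8 + g : ℕ) : ℤ) := by
          rw [pvFindFrom_nat, if_neg (by omega),
            if_neg (by rw [hfindu, if_neg hG, hgcast]; omega)]
          rw [hfindu, if_neg hG, hgcast]; push_cast; omega
        have hv0 : s.drop (pos + i + 8 + g) = w.drop g := by
          rw [hwdef, List.drop_drop]
        have hvdec : s.drop (pos + i + 8 + g) = '>' :: w.drop (g + 1) := by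
          obtain ⟨rest, hrest⟩ := hoccG
          have h1 : w.drop g = '>' :: rest := by rw [← hrest]; rfl
          have h2 : w.drop (g + 1) = rest := by
            have h3 := congrArg (List.drop 1) h1
            rw [List.drop_drop] at h3
            simpa using h3
          rw [hv0, h1, h2]
        have hfindv : PySem.Chars.find (s.drop (pos + i + 8 + g)) pvTag =
            if PySem.Chars.find (w.drop (g + 1)) pvTag = -1 then -1
            else 1 + PySem.Chars.find (w.drop (g + 1)) pvTag := by
          rw [hvdec]
          apply pvFind_cons
          intro hpre
          obtain ⟨hlt2, he2⟩ := pvPrefix_getElem hpre 0 (by decide)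
          simp only [List.getElem_cons_zero] at he2
          exact pvTagElemNe ⟨0, by decide⟩ he2.symm
        have hsec1 : ((pos + i + 8 + g : ℕ) : ℤ) + 1 = ((pos + i + 8 + g + 1 : ℕ) : ℤ) := by
          push_cast; omega
        have hsecdrop : s.drop (pos + i + 8 + g + 1) = w.drop (g + 1) := by
          rw [hwdef, List.drop_drop, show pos + i + 8 + (g + 1) = pos + i + 8 + g + 1 from by omega]
        by_cases hM : PySem.Chars.find (w.drop (g + 1)) pvTag = -1
        · have hnS : PySem.Chars.findFrom s pvTag ((pos + i + 8 + g : ℕ) : ℤ) none = -1 := by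
            rw [pvFindFrom_nat, if_neg (by omega), if_pos (by rw [hfindv, if_pos hM])]
          rw [pvA_loop.eq_def, hs, dif_neg (show ¬((pos + i : ℕ) : ℤ) = -1 by omega), htE,
            dif_neg (show ¬((pos + i + 8 + g : ℕ) : ℤ) = -1 by omega), hnS]
          simp only [↓reduceIte, ↓reduceDIte]
          rw [hsec1, PySem.Chars.slice_eq_listSlice, PySem.List.slice_from_natCast, hsecdrop]
          rw [pvStrip_chain]
          have hend : PySem.Chars.findFrom s pvTag ((s.length : ℕ) : ℤ) none = -1 := by
            rw [pvFindFrom_nat, if_neg (by omega),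
              if_pos (by rw [List.drop_length]; decide)]
          rw [pvA_loop.eq_def, hend]
          simp only [↓reduceDIte]
          rw [hchtail, ((pvCL w.length w le_rfl).2 g hgcast).1 hM]
          by_cases hb : pvStripAll (pvA_clean (w.drop (g + 1))) ≠ []
          · rw [if_pos hb]
            simp [pvEmitC, hb]
          · rw [if_neg hb]
            simp only [ne_eq, not_not] at hb
            simp [pvEmitC, hb]
        · have hM0 := pvFind_nonneg_of_ne hM
          set m := (PySem.Chars.find (w.drop (g + 1)) pvTag).toNat with hmdef
          have hmcast : PySem.Chars.find (w.drop (g + 1)) pvTag = (m : ℤ) :=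
            (Int.toNat_of_nonneg hM0).symm
          have hoccM : pvTag <+: s.drop (pos + i + 8 + g + 1 + m) := by
            have := pvOcc_of_find hM
            rw [← hmdef, List.drop_drop] at this
            rw [← List.drop_drop (j := pos + i + 8 + g + 1) (i := m), hsecdrop]
            rw [List.drop_drop]
            exact this
          have hmlen : pos + i + 8 + g + 1 + m + 8 ≤ s.length := by
            have := hoccM.length_le; simp only [List.length_drop, htag8] at this; omega
          have hnS : PySem.Chars.findFrom s pvTag ((pos + i + 8 + g : ℕ) : ℤ) none
              = ((pos + i + 8 + g + 1 + m : ℕ) : ℤ) := by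
            rw [pvFindFrom_nat, if_neg (by omega),
              if_neg (by rw [hfindv, if_neg hM, hmcast]; omega)]
            rw [hfindv, if_neg hM, hmcast]; push_cast; omega
          rw [pvA_loop.eq_def, hs, dif_neg (show ¬((pos + i : ℕ) : ℤ) = -1 by omega), htE,
            dif_neg (show ¬((pos + i + 8 + g : ℕ) : ℤ) = -1 by omega), hnS]
          simp only [if_neg (show ¬((pos + i + 8 + g + 1 + m : ℕ) : ℤ) = -1 by omega),
            dif_neg (show ¬((pos + i + 8 + g + 1 + m : ℕ) : ℤ) = -1 by omega)]
          rw [hsec1, PySem.Chars.slice_eq_listSlice, PySem.List.slice_natCast, hsecdrop]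
          rw [show pos + i + 8 + g + 1 + m - (pos + i + 8 + g + 1) = m from by omega]
          rw [pvStrip_chain, Int.toNat_natCast]
          rw [ih s (pos + i + 8 + g + 1 + m) (by omega) (by omega)]
          have hf0 : PySem.Chars.find (s.drop (pos + i + 8 + g + 1 + m)) pvTag = ((0 : ℕ) : ℤ) := by
            apply pvFind_eq_of
            · simpa using hoccM
            · omega
          have htail2 : (pvChunks (s.drop (pos + i + 8 + g + 1 + m))).tail =
              pvChunks (w.drop (g + 1 + m + 8)) := by
            rw [pvChunks.eq_def, dif_neg (by rw [hf0]; omega), List.tail_cons, hf0]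
            rw [List.drop_drop, hwdef, List.drop_drop]
            congr 1
            simp
            omega
          rw [htail2, hchtail, ((pvCL w.length w le_rfl).2 g hgcast).2 m hmcast]
          by_cases hb : pvStripAll (pvA_clean ((w.drop (g + 1)).take m)) ≠ []
          · rw [if_pos hb]
            simp [pvEmitC, hb]
          · rw [if_neg hb]
            simp only [ne_eq, not_not] at hb
            simp [pvEmitC, hb]

-- ===== B's fold emits chunk by chunk =====
theorem pvBstep (acc : List (List Char)) (part : List Char) :
    (let gt := PySem.Chars.find part pvGt
     if gt = -1 then acc
     else
       let body := PySem.Chars.strip (PySem.Chars.stripChars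
         (pvB_collapse (PySem.Chars.slice part (some (gt + 1)) none) []) ['`'])
       if body ≠ [] then acc ++ [body] else acc) = acc ++ pvEmit part := by
  by_cases hg : PySem.Chars.find part pvGt = -1
  · simp [pvEmit, hg]
  · have hg0 := pvFind_nonneg_of_ne hg
    set g := (PySem.Chars.find part pvGt).toNat with hgdef
    have hgcast : PySem.Chars.find part pvGt = (g : ℤ) := (Int.toNat_of_nonneg hg0).symm
    have hcast1 : (g : ℤ) + 1 = ((g + 1 : ℕ) : ℤ) := by push_cast; omega
    have hcol := pvB_collapse_eq (part.drop (g + 1)).length (part.drop (g + 1)) le_rfl []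
    rw [List.nil_append] at hcol
    simp only [hgcast, hcast1, PySem.Chars.slice_eq_listSlice, PySem.List.slice_from_natCast,
      hcol, if_neg (show ¬((g : ℕ) : ℤ) = -1 by omega)]
    simp only [pvEmit, hgcast, if_neg (show ¬((g : ℕ) : ℤ) = -1 by omega), Int.toNat_natCast,
      pvEmitC, pvStripAll]
    by_cases hb : PySem.Chars.strip (PySem.Chars.stripChars (pvA_clean (part.drop (g + 1))) ['`']) ≠ []
    · rw [if_pos hb, if_pos hb]
    · rw [if_neg hb, if_neg hb, List.append_nil]

theorem pvFoldB : ∀ (l : List (List Char)) (acc : List (List Char)),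
    List.foldl (fun acc part =>
      let gt := PySem.Chars.find part pvGt
      if gt = -1 then acc
      else
        let body := PySem.Chars.strip (PySem.Chars.stripChars
          (pvB_collapse (PySem.Chars.slice part (some (gt + 1)) none) []) ['`'])
        if body ≠ [] then acc ++ [body] else acc) acc l = acc ++ l.flatMap pvEmit := by
  intro l
  induction l with
  | nil => intro acc; simp
  | cons p t ih =>
    intro acc
    rw [List.foldl_cons, pvBstep, ih, List.flatMap_cons, List.append_assoc]

-- ===== VERDICT (by name: the statement is the Claim_ definition above) =====
theorem parse_model_split_response_spec : Claim_equal_parse_model_split_response := by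
  intro split_text _
  unfold Spec_parse_model_split_response
  unfold parse_model_split_response parse_model_split_response_alt
  simp only [pvA_fences]
  set r := PySem.Chars.replace (PySem.Chars.replace split_text.toList "```markdown".toList [])
    "```".toList [] with hrdef
  rw [pvSplitOn_eq]
  by_cases hF : PySem.Chars.find r pvTag = -1
  · have hch : pvChunks r = [r] := by rw [pvChunks.eq_def, dif_pos hF]
    rw [hch, if_pos (show ([r] : List (List Char)).length = 1 from by simp)]
    rw [hF, if_neg (show ¬((0 : ℤ) < -1) from by omega)]
    rw [pvA_loop_eq r.length r 0 (by omega) (by omega)]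
    rw [List.drop_zero, hch]
    simp
  · have hF0 := pvFind_nonneg_of_ne hF
    set i := (PySem.Chars.find r pvTag).toNat with hidef
    have hicast : PySem.Chars.find r pvTag = (i : ℤ) := (Int.toNat_of_nonneg hF0).symm
    have hocc : pvTag <+: r.drop i := by
      have := pvOcc_of_find hF; rw [← hidef] at this; exact this
    have hib : i + 8 ≤ r.length := by
      have := hocc.length_le
      simp only [List.length_drop, show pvTag.length = 8 by decide] at this
      omega
    have hch : pvChunks r = r.take i :: pvChunks (r.drop (i + 8)) := by
      rw [pvChunks.eq_def, dif_neg hF, ← hidef]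
    rw [hch]
    rw [if_neg (show ¬(r.take i :: pvChunks (r.drop (i + 8))).length = 1 from by
      simp only [List.length_cons]
      intro hcon
      exact pvChunks_ne_nil (r.drop (i + 8)) (List.length_eq_zero_iff.mp (by omega)))]
    simp only [List.headD_cons, List.tail_cons]
    rw [pvFoldB]
    rw [pvA_loop_eq r.length r 0 (by omega) (by omega), List.drop_zero, hch, List.tail_cons]
    congr 2
    rw [hicast, PySem.Chars.slice_eq_listSlice, PySem.List.slice_to_natCast]
    by_cases h0 : i = 0
    · rw [if_neg (show ¬((0 : ℤ) < ((i : ℕ) : ℤ)) from by omega),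
        if_neg (show ¬(r.take i ≠ []) from by rw [h0]; simp)]
    · rw [if_pos (show (0 : ℤ) < ((i : ℕ) : ℤ) from by omega),
        if_pos (show r.take i ≠ [] from by
          intro hcon
          have := congrArg List.length hcon
          simp only [List.length_take, List.length_nil] at this
          omega)]
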